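-- pv_equiv track=rewrite | github.com/sakshisingh12/Data-Structures-and-Algorithms | Practice Problems/magic_mod.py | check
-- ===== SOURCE A (Python) =====
-- def check(array:list, n:int, x:int):
--     h = {}
--     for i in range(n):
--         h[i+1] = 0
--
--     for i in range(n):
--         rem = array[i]%x
--         if rem in h:
--             h[rem] += 1
--
--     for key, val in h.items():
--         if val != 1:
--             return "NO"
--
--     return "YES"
-- ===== SOURCE B (Python) =====
-- def check(array: list, n: int, x: int):
--     rems = [array[i] % x for i in range(n)]
--     return "YES" if sorted(rems) == list(range(1, n + 1)) else "NO"
-- ===== Notes on version B (the rewrite author's own statement) =====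
-- stated objective: simpler
-- what changed: Replaces A's build-a-dict-of-class-counts-then-scan-counts with a single remainder comprehension compared, after sorting, against the expected list [1..n].
import Mathlib
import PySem

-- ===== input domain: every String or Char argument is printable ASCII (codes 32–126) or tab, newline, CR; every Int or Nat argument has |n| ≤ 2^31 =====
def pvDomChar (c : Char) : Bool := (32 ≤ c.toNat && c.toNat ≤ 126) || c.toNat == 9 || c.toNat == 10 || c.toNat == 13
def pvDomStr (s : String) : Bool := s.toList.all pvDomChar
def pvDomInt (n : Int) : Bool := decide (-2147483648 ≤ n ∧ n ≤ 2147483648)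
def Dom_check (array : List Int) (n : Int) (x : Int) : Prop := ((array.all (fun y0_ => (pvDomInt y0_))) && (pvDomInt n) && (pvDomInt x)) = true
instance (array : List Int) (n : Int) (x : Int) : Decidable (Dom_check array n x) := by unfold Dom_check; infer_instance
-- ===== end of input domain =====

-- B replaces A's dict-of-class-counts with sorting the remainder list and comparing it to [1..n]
-- (same return value on all admitted inputs; not claimed faster).

-- ===== PORT A =====
def check (array : List Int) (n : Int) (x : Int) : String :=
  -- h = {}; for i in range(n): h[i+1] = 0
  let h := (PySem.List.pyRange 0 n).foldl (fun d i => d.insert (i + 1) 0)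
    (PySem.Dict.empty : PySem.Dict Int Int)
  -- for i in range(n): rem = array[i] % x; if rem in h: h[rem] += 1
  let h := (PySem.List.pyRange 0 n).foldl (fun d i =>
    let rem := PySem.Int.mod ((PySem.List.pyGet? array i).getD 0) x
    if d.contains rem then d.modify rem 0 (· + 1) else d) h
  -- for key, val in h.items(): if val != 1: return "NO"   /   return "YES"
  if h.items.any (fun p => p.2 != 1) then "NO" else "YES"

-- ===== PORT B =====
def check_alt (array : List Int) (n : Int) (x : Int) : String :=
  -- rems = [array[i] % x for i in range(n)]
  let rems := (PySem.List.pyRange 0 n).map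
    (fun i => PySem.Int.mod ((PySem.List.pyGet? array i).getD 0) x)
  -- "YES" if sorted(rems) == list(range(1, n + 1)) else "NO"
  if PySem.List.sorted rems (fun r => r) = PySem.List.pyRange 1 (n + 1) then "YES" else "NO"

-- ===== PRECONDITION & SPEC =====
-- Pre_ excludes exactly the inputs where Python A raises: with n ≥ 1 it reads array[0..n-1] and
-- divides by x, so x = 0 raises ZeroDivisionError and n > len(array) raises IndexError.
def Pre_check (array : List Int) (n : Int) (x : Int) : Prop :=
  1 ≤ n → (x ≠ 0 ∧ n ≤ (array.length : Int))
instance (array : List Int) (n : Int) (x : Int) : Decidable (Pre_check array n x) := by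
  unfold Pre_check; infer_instance
def pvWitness_check : List Int × Int × Int := ([1, 2], 2, 3)

def Spec_check (array : List Int) (n : Int) (x : Int) (out : String) : Prop := out = check_alt array n x
instance (array : List Int) (n : Int) (x : Int) (out : String) : Decidable (Spec_check array n x out) := by
  unfold Spec_check; infer_instance

-- ===== CLAIM (what is proved, stated in full; the proofs are below) =====
def Claim_equal_check : Prop := ∀ (array : List Int) (n : Int) (x : Int), Dom_check array n x → Pre_check array n x → Spec_check array n x (check array n x)

-- ===== LEMMAS AND PROOFS =====

lemma shift_range (n : Int) :
    (PySem.List.pyRange 0 n).map (· + 1) = PySem.List.pyRange 1 (n + 1) := by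
  rw [PySem.List.pyRange_of_pos 0 n (by norm_num), PySem.List.pyRange_of_pos 1 (n + 1) (by norm_num)]
  simp [List.map_map]
  intro a _
  omega

lemma K_pairwise (n : Int) :
    (PySem.List.pyRange 1 (n + 1)).Pairwise (· < ·) := by
  rw [PySem.List.pyRange_of_pos 1 (n + 1) (by norm_num)]
  refine List.Pairwise.map _ ?_ List.pairwise_lt_range
  intro a b h
  omega

lemma K_nodup (n : Int) : (PySem.List.pyRange 1 (n + 1)).Nodup :=
  (K_pairwise n).imp (fun h => ne_of_lt h)

-- the second loop of A: the condition is stable (modify of a contained key keeps the key set),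
-- so the loop is a plain counting loop over the remainders that are keys of the initial dict
lemma foldl_cond_modify (q : Int → Int) (l : List Int) (d : PySem.Dict Int Int) :
    l.foldl (fun d i => if d.contains (q i) then d.modify (q i) 0 (· + 1) else d) d
      = ((l.map q).filter (fun r => d.contains r)).foldl (fun d r => d.modify r 0 (· + 1)) d := by
  induction l generalizing d with
  | nil => rfl
  | cons i l ih =>
    simp only [List.foldl_cons, List.map_cons, List.filter_cons]
    by_cases hc : d.contains (q i) = true
    · have hk : ∀ r, (d.modify (q i) 0 (· + 1)).contains r = d.contains r := by
        intro r
        rw [PySem.Dict.contains_modify]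
        by_cases hr : r = q i
        · subst hr; simp [hc]
        · simp [hr]
      rw [if_pos hc, ih, hc, if_pos rfl, List.foldl_cons,
        List.filter_congr (fun r _ => hk r)]
    · have hc' : d.contains (q i) = false := by simpa using hc
      rw [if_neg hc, ih, hc']
      simp

lemma keys_foldl_modify_contained (l : List Int) (d : PySem.Dict Int Int)
    (h : ∀ r ∈ l, d.contains r = true) :
    (l.foldl (fun d r => d.modify r 0 (· + 1)) d).keys = d.keys := by
  induction l generalizing d with
  | nil => rfl
  | cons r l ih =>
    have hkeys : (d.modify r 0 (· + 1)).keys = d.keys := by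
      rw [PySem.Dict.keys_modify, PySem.Dict.keys_insert_of_contains _ _ (h r (by simp))]
    simp only [List.foldl_cons]
    rw [ih, hkeys]
    intro r' hr'
    rw [PySem.Dict.contains_eq_decide_mem_keys, hkeys, ← PySem.Dict.contains_eq_decide_mem_keys]
    exact h r' (List.mem_cons_of_mem _ hr')

-- B's condition: the sorted remainder list equals [1..n] iff every k in [1..n] occurs exactly once
-- (the lists have equal length)
lemma sorted_eq_range_iff (rems : List Int) (n : Int)
    (hlen : rems.length = (PySem.List.pyRange 1 (n + 1)).length) :
    PySem.List.sorted rems (fun r => r) = PySem.List.pyRange 1 (n + 1)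
      ↔ ∀ k ∈ PySem.List.pyRange 1 (n + 1), rems.count k = 1 := by
  constructor
  · intro hs k hk
    have hperm : (PySem.List.pyRange 1 (n + 1)).Perm rems := by
      rw [← hs]; exact PySem.List.sorted_perm rems (fun r => r) false
    rw [← hperm.count_eq]
    exact List.count_eq_one_of_mem (K_nodup n) hk
  · intro hcount
    have hsub : (PySem.List.pyRange 1 (n + 1)).Subperm rems := by
      rw [List.subperm_ext_iff]
      intro k hk
      rw [hcount k hk, List.count_eq_one_of_mem (K_nodup n) hk]
    have hperm : (PySem.List.pyRange 1 (n + 1)).Perm rems :=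
      hsub.perm_of_length_le (le_of_eq hlen)
    exact PySem.List.sorted_eq_of_perm_of_pairwise_lt rems _ (fun r => r) hperm (K_pairwise n)

lemma check_eq_check_alt (array : List Int) (n : Int) (x : Int) :
    check array n x = check_alt array n x := by
  unfold check check_alt
  simp only []
  set f : Int → Int := fun i => PySem.Int.mod ((PySem.List.pyGet? array i).getD 0) x with hf
  set R := PySem.List.pyRange 0 n with hRdef
  set K := PySem.List.pyRange 1 (n + 1) with hKdef
  set rems := R.map f with hrems
  -- the initial dict: keys K, all values 0
  have hRK : R.map (· + 1) = K := shift_range n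
  have hmapnd : (R.map (· + 1)).Nodup := by rw [hRK]; exact K_nodup n
  set h0 := R.foldl (fun d i => d.insert (i + 1) 0) (PySem.Dict.empty : PySem.Dict Int Int) with hh0
  have h0items : h0.items = R.map (fun i => (i + 1, (0 : Int))) := by
    rw [hh0, PySem.Dict.items_foldl_insert_fresh R (· + 1) (fun _ => (0 : Int)) _
      (fun a _ => PySem.Dict.contains_empty _) hmapnd]
    simp [PySem.Dict.empty]
  have h0keys : h0.keys = K := by
    simp only [PySem.Dict.keys, h0items, List.map_map, ← hRK, List.map_map]
    rfl
  have h0contains : ∀ r, h0.contains r = decide (r ∈ K) := by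
    intro r; rw [PySem.Dict.contains_eq_decide_mem_keys, h0keys]
  have h0nd : h0.keys.Nodup := by rw [h0keys]; exact K_nodup n
  have h0getD : ∀ k ∈ K, h0.getD k 0 = 0 := by
    intro k hk
    rw [← hRK] at hk
    obtain ⟨i, hi, rfl⟩ := List.mem_map.mp hk
    exact PySem.Dict.getD_of_mem_items h0
      (by rw [h0items]; exact List.mem_map.mpr ⟨i, hi, rfl⟩) h0nd 0
  -- the counting loop
  set h1 := R.foldl (fun d i =>
    if d.contains (f i) then d.modify (f i) 0 (· + 1) else d) h0 with hh1
  have h1eq : h1 = (rems.filter (fun r => h0.contains r)).foldl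
      (fun d r => d.modify r 0 (· + 1)) h0 := by
    rw [hh1, foldl_cond_modify f R h0, hrems]
  have hfiltmem : ∀ r ∈ rems.filter (fun r => h0.contains r), h0.contains r = true :=
    fun r hr => (List.mem_filter.mp hr).2
  have h1keys : h1.keys = K := by
    rw [h1eq, keys_foldl_modify_contained _ _ hfiltmem, h0keys]
  have h1nd : h1.keys.Nodup := by rw [h1keys]; exact K_nodup n
  have h1getD : ∀ k ∈ K, h1.getD k 0 = rems.count k := by
    intro k hk
    rw [h1eq, PySem.Dict.getD_foldl_modify_add_one, h0getD k hk,
      List.count_filter (by rw [h0contains k]; simpa using hk)]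
    simp
  -- A answers YES iff every k in K has count 1
  have hAiff : (h1.items.any (fun p => p.2 != 1) = false) ↔ ∀ k ∈ K, rems.count k = 1 := by
    rw [PySem.Dict.items_eq_map_keys h1 h1nd 0, h1keys]
    simp only [List.any_map, List.any_eq_false, Function.comp]
    constructor
    · intro hall k hk
      have := hall k hk
      simp only [bne_iff_ne, ne_eq, not_not] at this
      rw [h1getD k hk] at this
      exact_mod_cast this
    · intro hall k hk
      simp only [bne_iff_ne, ne_eq, not_not]
      rw [h1getD k hk]
      exact_mod_cast hall k hk
  -- lengths used by the B-side characterisation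
  have hlen : rems.length = K.length := by
    rw [hrems, ← hRK]; simp
  have hBiff := sorted_eq_range_iff rems n hlen
  by_cases hcond : ∀ k ∈ K, rems.count k = 1
  · rw [if_neg (by simp [hAiff.mpr hcond]), if_pos (hBiff.mpr hcond)]
  · have hA : h1.items.any (fun p => p.2 != 1) = true := by
      rcases Bool.eq_false_or_eq_true (h1.items.any (fun p => p.2 != 1)) with h | h
      · exact h
      · exact absurd (hAiff.mp h) hcond
    rw [if_pos hA, if_neg (fun h => hcond (hBiff.mp h))]

-- ===== VERDICT (by name: the statement is the Claim_ definition above) =====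
theorem check_spec : Claim_equal_check := by
  intro array n x _ _
  unfold Spec_check
  exact check_eq_check_alt array n x
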